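-- pv_equiv track=rewrite | github.com/Arsen1302/Code-copy-detector | TestData/solutions/problem_1236_5.py | solution_1236_5
-- ===== SOURCE A (Python) =====
-- from typing import List
--
-- def solution_1236_5(logs: List[List[int]], k: int) -> List[int]:
--     dct = {}
--     ans = [0] * k
--     for log in logs:
--         if log[0] in dct:
--             dct[log[0]].add(log[1])
--         else:
--             dct[log[0]] = {log[1]}
--
--     for i in dct.values():
--         ans[len(i)-1] = ans[len(i)-1] + 1
--
--     return ans
-- ===== SOURCE B (Python) =====
-- from typing import List
--
-- def solution_1236_5(logs: List[List[int]], k: int) -> List[int]: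
--     pairs = sorted(dict.fromkeys((log[0], log[1]) for log in logs),
--                    key=lambda p: p[0])
--     ans = [0] * k
--     prev = None
--     run = 0
--     for u, _ in pairs:
--         if u == prev:
--             run += 1
--         else:
--             if run:
--                 ans[run - 1] += 1
--             run = 1
--             prev = u
--     if run:
--         ans[run - 1] += 1
--     return ans
-- ===== Notes on version B (the rewrite author's own statement) =====
-- stated objective: alternative
-- what changed: B replaces A's hash dict-of-sets with sort-then-scan: it deduplicates the (user, uaid) pairs, sorts them by user, and counts run lengths in one linear pass over the sorted list, with no per-user container at all.
import Mathlib
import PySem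

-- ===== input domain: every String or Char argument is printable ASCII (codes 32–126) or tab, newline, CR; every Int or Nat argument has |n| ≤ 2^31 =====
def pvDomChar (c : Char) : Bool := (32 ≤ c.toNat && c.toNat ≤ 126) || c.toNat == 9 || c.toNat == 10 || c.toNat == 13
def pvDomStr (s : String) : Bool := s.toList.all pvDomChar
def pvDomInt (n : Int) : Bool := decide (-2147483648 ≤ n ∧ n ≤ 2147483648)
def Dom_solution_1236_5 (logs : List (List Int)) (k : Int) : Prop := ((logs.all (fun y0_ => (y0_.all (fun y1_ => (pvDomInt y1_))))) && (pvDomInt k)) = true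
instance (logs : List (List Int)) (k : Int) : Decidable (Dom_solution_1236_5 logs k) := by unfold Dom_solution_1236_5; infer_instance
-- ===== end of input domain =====

-- B replaces A's dict-of-sets with sort-then-scan: dedup the (user, uaid) pairs, sort by
-- user, and count run lengths in one linear pass (objective: alternative, not faster).

-- ===== PORT A =====
def solution_1236_5 (logs : List (List Int)) (k : Int) : List Int :=
  let dct := logs.foldl (fun d log =>
    let u := (PySem.List.pyGet? log 0).getD 0
    let v := (PySem.List.pyGet? log 1).getD 0
    if d.contains u then d.insert u (PySem.Set.add (d.getD u PySem.Set.empty) v)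
    else d.insert u (PySem.Set.ofList [v])) PySem.Dict.empty
  let ans := List.replicate k.toNat (0 : Int)
  dct.values.foldl (fun ans s =>
    PySem.List.pySetD ans (PySem.Set.len s - 1) (PySem.List.pyGetD ans (PySem.Set.len s - 1) 0 + 1)) ans

-- ===== PORT B =====
def solution_1236_5_alt (logs : List (List Int)) (k : Int) : List Int :=
  let pairs := PySem.List.sorted (PySem.List.dedup (logs.map (fun log =>
    ((PySem.List.pyGet? log 0).getD 0, (PySem.List.pyGet? log 1).getD 0)))) (fun p => p.1) false
  let ans := List.replicate k.toNat (0 : Int)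
  let st := pairs.foldl (fun (st : List Int × Option Int × Int) p =>
      if some p.1 == st.2.1 then (st.1, st.2.1, st.2.2 + 1)
      else ((if st.2.2 ≠ 0 then
               PySem.List.pySetD st.1 (st.2.2 - 1) (PySem.List.pyGetD st.1 (st.2.2 - 1) 0 + 1)
             else st.1), some p.1, (1 : Int)))
    (ans, none, 0)
  if st.2.2 ≠ 0 then
    PySem.List.pySetD st.1 (st.2.2 - 1) (PySem.List.pyGetD st.1 (st.2.2 - 1) 0 + 1)
  else st.1

-- ===== PRECONDITION & SPEC =====
-- Pre_ excludes exactly the inputs on which the Python A raises IndexError: a log row with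
-- fewer than two entries, or a user with more than k distinct UAIDs (then ans[count-1] is out of range).
def Pre_solution_1236_5 (logs : List (List Int)) (k : Int) : Prop :=
  (∀ log ∈ logs, 2 ≤ log.length) ∧
  (∀ log ∈ logs,
    (((PySem.List.dedup (logs.map (fun l => (l.getD 0 0, l.getD 1 0)))).countP
        (fun p => p.1 = log.getD 0 0) : Nat) : Int) ≤ k)
instance (logs : List (List Int)) (k : Int) : Decidable (Pre_solution_1236_5 logs k) := by
  unfold Pre_solution_1236_5; infer_instance

def pvWitness_solution_1236_5 : List (List Int) × Int := ([[1, 2], [1, 3], [2, 2]], 2)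

def Spec_solution_1236_5 (logs : List (List Int)) (k : Int) (out : List Int) : Prop := out = solution_1236_5_alt logs k
instance (logs : List (List Int)) (k : Int) (out : List Int) : Decidable (Spec_solution_1236_5 logs k out) := by unfold Spec_solution_1236_5; infer_instance

-- ===== CLAIM (what is proved, stated in full; the proofs are below) =====
def Claim_equal_solution_1236_5 : Prop := ∀ (logs : List (List Int)) (k : Int), Dom_solution_1236_5 logs k → Pre_solution_1236_5 logs k → Spec_solution_1236_5 logs k (solution_1236_5 logs k)

-- ===== LEMMAS AND PROOFS =====

-- the (user, uaid) pair a log row contributes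
def pvPairOf (log : List Int) : Int × Int :=
  ((PySem.List.pyGet? log 0).getD 0, (PySem.List.pyGet? log 1).getD 0)

-- A's dict-building step, expressed on the pair
def pvStepA (d : PySem.Dict Int (PySem.Set Int)) (p : Int × Int) : PySem.Dict Int (PySem.Set Int) :=
  if d.contains p.1 then d.insert p.1 (PySem.Set.add (d.getD p.1 PySem.Set.empty) p.2)
  else d.insert p.1 (PySem.Set.ofList [p.2])

def pvDA (ps : List (Int × Int)) : PySem.Dict Int (PySem.Set Int) :=
  ps.foldl pvStepA PySem.Dict.empty

-- increment ans[i] (Python index semantics), and the histogram step for one count c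
def pvInc (a : List Int) (i : Int) : List Int :=
  PySem.List.pySetD a i (PySem.List.pyGetD a i 0 + 1)

def pvStep (a : List Int) (c : Int) : List Int := pvInc a (c - 1)

-- B's scan step and its finishing move
def pvF (st : List Int × Option Int × Int) (p : Int × Int) : List Int × Option Int × Int :=
  if some p.1 == st.2.1 then (st.1, st.2.1, st.2.2 + 1)
  else ((if st.2.2 ≠ 0 then
           PySem.List.pySetD st.1 (st.2.2 - 1) (PySem.List.pyGetD st.1 (st.2.2 - 1) 0 + 1)
         else st.1), some p.1, (1 : Int))

def pvFinish (st : List Int × Option Int × Int) : List Int :=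
  if st.2.2 ≠ 0 then
    PySem.List.pySetD st.1 (st.2.2 - 1) (PySem.List.pyGetD st.1 (st.2.2 - 1) 0 + 1)
  else st.1

-- run-length encoding of the first components
def pvRunCounts : List (Int × Int) → List Int
  | [] => []
  | p :: qs => (1 + ((qs.takeWhile (fun q => q.1 == p.1)).length : Int)) ::
      pvRunCounts (qs.dropWhile (fun q => q.1 == p.1))
termination_by qs => qs.length
decreasing_by
  simp only [List.length_cons]
  exact Nat.lt_succ_of_le (List.length_dropWhile_le _ _)

def pvRunKeys : List (Int × Int) → List Int
  | [] => []
  | p :: qs => p.1 :: pvRunKeys (qs.dropWhile (fun q => q.1 == p.1))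
termination_by qs => qs.length
decreasing_by
  simp only [List.length_cons]
  exact Nat.lt_succ_of_le (List.length_dropWhile_le _ _)


-- index resolution facts
lemma pvIdx_lt (n : Nat) (i : Int) (k : Nat) (h : PySem.List.pyIdx? n i = some k) : k < n := by
  unfold PySem.List.pyIdx? at h
  split_ifs at h <;> simp_all <;> omega

lemma pvInc_of_none (a : List Int) (i : Int) (h : PySem.List.pyIdx? a.length i = none) :
    pvInc a i = a := by
  simp [pvInc, PySem.List.pySetD, PySem.List.pySet?, h]

lemma pvInc_of_some (a : List Int) (i : Int) (k : Nat) (h : PySem.List.pyIdx? a.length i = some k) :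
    pvInc a i = a.set k (a.getD k 0 + 1) := by
  have hk := pvIdx_lt a.length i k h
  simp [pvInc, PySem.List.pySetD, PySem.List.pySet?, PySem.List.pyGetD, PySem.List.pyGet?, h,
    List.getD_eq_getElem?_getD, List.getElem?_eq_getElem hk]

lemma pvInc_length (a : List Int) (i : Int) : (pvInc a i).length = a.length := by
  simp [pvInc, PySem.List.length_pySetD]

-- two increments commute
lemma pvInc_comm (a : List Int) (i j : Int) : pvInc (pvInc a i) j = pvInc (pvInc a j) i := by
  cases hi : PySem.List.pyIdx? a.length i with
  | none =>
    have h1 : pvInc a i = a := pvInc_of_none a i hi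
    cases hj : PySem.List.pyIdx? a.length j with
    | none =>
      have h2 : pvInc a j = a := pvInc_of_none a j hj
      rw [h1, h2, h1]
    | some m =>
      rw [h1, pvInc_of_none (pvInc a j) i (by rw [pvInc_length]; exact hi)]
  | some n =>
    cases hj : PySem.List.pyIdx? a.length j with
    | none =>
      have h2 : pvInc a j = a := pvInc_of_none a j hj
      rw [h2, pvInc_of_none (pvInc a i) j (by rw [pvInc_length]; exact hj)]
    | some m =>
      by_cases hnm : n = m
      · subst hnm
        rw [pvInc_of_some a i n hi, pvInc_of_some a j n hj,
          pvInc_of_some _ j n (by simpa using hj), pvInc_of_some _ i n (by simpa using hi)]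
      · have hn := pvIdx_lt a.length i n hi
        have hm := pvIdx_lt a.length j m hj
        rw [pvInc_of_some a i n hi, pvInc_of_some a j m hj,
          pvInc_of_some _ j m (by simpa using hj), pvInc_of_some _ i n (by simpa using hi)]
        simp only [List.getD_eq_getElem?_getD,
          List.getElem?_set_ne (show n ≠ m from hnm),
          List.getElem?_set_ne (show m ≠ n from fun h => hnm h.symm)]
        rw [List.set_comm _ _ hnm]

lemma pvFinish_eq (a : List Int) (o : Option Int) (r : Int) (hr : r ≠ 0) :
    pvFinish (a, o, r) = pvStep a r := by
  simp only [pvFinish]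
  rw [if_pos hr]
  rfl

-- the scan over one run and beyond
lemma pvScan_run (qs : List (Int × Int)) : ∀ (u : Int) (r : Int) (a : List Int), 1 ≤ r →
    pvFinish (qs.foldl pvF (a, some u, r)) =
      List.foldl pvStep a ((r + ((qs.takeWhile (fun q => q.1 == u)).length : Int)) ::
        pvRunCounts (qs.dropWhile (fun q => q.1 == u))) := by
  induction qs with
  | nil =>
    intro u r a hr
    simp only [List.foldl_nil, List.takeWhile_nil, List.dropWhile_nil,
      List.length_nil, Nat.cast_zero, add_zero]
    rw [pvRunCounts.eq_1, List.foldl_cons, List.foldl_nil,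
      pvFinish_eq a (some u) r (by omega)]
  | cons p qs ih =>
    intro u r a hr
    by_cases hp : p.1 = u
    · have hb : (p.1 == u) = true := by simp [hp]
      rw [List.foldl_cons, show pvF (a, some u, r) p = (a, some u, r + 1) by
        simp [pvF, hp]]
      rw [ih u (r + 1) a (by omega), List.takeWhile_cons, List.dropWhile_cons]
      simp only [hb, if_true, List.length_cons]
      push_cast
      ring_nf
    · have hb : (p.1 == u) = false := by simp [hp]
      have hr0 : r ≠ 0 := by omega
      have hstep : pvF (a, some u, r) p = (pvStep a r, some p.1, 1) := by
        simp only [pvF]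
        rw [if_neg (by simp [hp]), if_pos hr0]
        rfl
      rw [List.foldl_cons, hstep, ih p.1 1 (pvStep a r) le_rfl, List.takeWhile_cons,
        List.dropWhile_cons]
      simp only [hb, Bool.false_eq_true, if_false, List.length_nil, Nat.cast_zero,
        add_zero, List.foldl_cons]
      rw [pvRunCounts.eq_2, List.foldl_cons]

lemma pvScan (qs : List (Int × Int)) (a : List Int) :
    pvFinish (qs.foldl pvF (a, none, 0)) = List.foldl pvStep a (pvRunCounts qs) := by
  cases qs with
  | nil =>
    rw [List.foldl_nil, pvRunCounts.eq_1, List.foldl_nil]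
    simp [pvFinish]
  | cons p qs =>
    rw [List.foldl_cons, show pvF (a, none, 0) p = (a, some p.1, 1) by simp [pvF],
      pvScan_run qs p.1 1 a le_rfl, pvRunCounts.eq_2]

-- after the run of p.1, no element has first component p.1 again (sorted input)
lemma pvDrop_ne (p : Int × Int) (qs : List (Int × Int))
    (h : (p :: qs).Pairwise (fun x y => x.1 ≤ y.1)) :
    ∀ x ∈ qs.dropWhile (fun q => q.1 == p.1), x.1 ≠ p.1 := by
  intro x hx
  cases hd : qs.dropWhile (fun q => q.1 == p.1) with
  | nil => rw [hd] at hx; cases hx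
  | cons h0 d' =>
    rw [hd] at hx
    have hw : qs.dropWhile (fun q => q.1 == p.1) ≠ [] := by rw [hd]; simp
    have hh0 := List.head_dropWhile_not (fun q : Int × Int => q.1 == p.1) hw
    simp only [hd, List.head_cons] at hh0
    have hh0' : h0.1 ≠ p.1 := by simpa using hh0
    have hsub : (h0 :: d').Sublist qs := hd ▸ List.dropWhile_sublist _
    have hmem : h0 ∈ qs := hsub.subset List.mem_cons_self
    have hph0 : p.1 ≤ h0.1 := (List.pairwise_cons.mp h).1 h0 hmem
    rcases List.mem_cons.mp hx with rfl | hx'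
    · exact hh0'
    · have hpw : (h0 :: d').Pairwise (fun x y => x.1 ≤ y.1) :=
        ((List.pairwise_cons.mp h).2).sublist hsub
      have := (List.pairwise_cons.mp hpw).1 x hx'
      omega

lemma pvRunKeys_subset : ∀ qs : List (Int × Int), ∀ u ∈ pvRunKeys qs, u ∈ qs.map Prod.fst := by
  intro qs
  induction qs using pvRunKeys.induct with
  | case1 => intro u hu; rw [pvRunKeys.eq_1] at hu; cases hu
  | case2 p qs ih =>
    intro u hu
    rw [pvRunKeys.eq_2] at hu
    rcases List.mem_cons.mp hu with rfl | hu'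
    · exact List.mem_cons_self
    · have h1 := ih u hu'
      have hsub := (@List.dropWhile_sublist _ qs (fun q => q.1 == p.1)).map Prod.fst
      exact List.mem_cons_of_mem _ (hsub.subset h1)

lemma pvRunKeys_nodup : ∀ qs : List (Int × Int),
    qs.Pairwise (fun x y => x.1 ≤ y.1) → (pvRunKeys qs).Nodup := by
  intro qs
  induction qs using pvRunKeys.induct with
  | case1 => intro _; rw [pvRunKeys.eq_1]; exact List.nodup_nil
  | case2 p qs ih =>
    intro h
    rw [pvRunKeys.eq_2]
    refine List.nodup_cons.mpr ⟨?_, ih (((List.pairwise_cons.mp h).2).sublist (List.dropWhile_sublist _))⟩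
    intro hmem
    have := pvRunKeys_subset _ _ hmem
    rcases List.mem_map.mp this with ⟨x, hx, hx1⟩
    exact pvDrop_ne p qs h x hx hx1

lemma pvRunKeys_mem : ∀ qs : List (Int × Int), qs.Pairwise (fun x y => x.1 ≤ y.1) →
    ∀ u, u ∈ pvRunKeys qs ↔ u ∈ qs.map Prod.fst := by
  intro qs
  induction qs using pvRunKeys.induct with
  | case1 => intro _ u; rw [pvRunKeys.eq_1]; simp
  | case2 p qs ih =>
    intro h u
    constructor
    · exact pvRunKeys_subset _ u
    · intro hu
      rw [pvRunKeys.eq_2]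
      by_cases hup : u = p.1
      · exact hup ▸ List.mem_cons_self
      · have hq : u ∈ qs.map Prod.fst := by
          rcases List.mem_cons.mp hu with h1 | h1
          · exact absurd h1 hup
          · exact h1
        rcases List.mem_map.mp hq with ⟨x, hx, hx1⟩
        have hxd : x ∈ qs.dropWhile (fun q => q.1 == p.1) := by
          have hsplit := List.takeWhile_append_dropWhile
            (p := fun q : Int × Int => q.1 == p.1) (l := qs)
          rcases List.mem_append.mp (hsplit ▸ hx) with h2 | h2
          · exact absurd (by simpa using List.mem_takeWhile_imp h2 : x.1 = p.1)
              (by rw [hx1]; exact hup)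
          · exact h2
        have hmem : u ∈ (qs.dropWhile (fun q => q.1 == p.1)).map Prod.fst :=
          hx1 ▸ List.mem_map_of_mem hxd
        exact List.mem_cons_of_mem _
          ((ih (((List.pairwise_cons.mp h).2).sublist (List.dropWhile_sublist _)) u).mpr hmem)

lemma pvRunCounts_grouped : ∀ qs : List (Int × Int), qs.Pairwise (fun x y => x.1 ≤ y.1) →
    pvRunCounts qs = (pvRunKeys qs).map (fun u => (((qs.map Prod.fst).count u : Nat) : Int)) := by
  intro qs
  induction qs using pvRunKeys.induct with
  | case1 => intro _; rw [pvRunCounts.eq_1, pvRunKeys.eq_1]; rfl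
  | case2 p qs ih =>
    intro h
    have hsplit : qs.takeWhile (fun q => q.1 == p.1) ++ qs.dropWhile (fun q => q.1 == p.1) = qs :=
      List.takeWhile_append_dropWhile
    have hpwd : (qs.dropWhile (fun q => q.1 == p.1)).Pairwise (fun x y => x.1 ≤ y.1) :=
      ((List.pairwise_cons.mp h).2).sublist (List.dropWhile_sublist _)
    have hqs : qs.map Prod.fst = (qs.takeWhile (fun q => q.1 == p.1)).map Prod.fst
        ++ (qs.dropWhile (fun q => q.1 == p.1)).map Prod.fst := by
      rw [← List.map_append, hsplit]
    have hcount_t : ∀ u, u ≠ p.1 →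
        ((qs.takeWhile (fun q => q.1 == p.1)).map Prod.fst).count u = 0 := by
      intro u hu
      rw [List.count_eq_zero]
      intro hmem
      rcases List.mem_map.mp hmem with ⟨x, hx, hx1⟩
      exact hu (hx1 ▸ (by simpa using List.mem_takeWhile_imp hx))
    have hcount_d : ((qs.dropWhile (fun q => q.1 == p.1)).map Prod.fst).count p.1 = 0 := by
      rw [List.count_eq_zero]
      intro hmem
      rcases List.mem_map.mp hmem with ⟨x, hx, hx1⟩
      exact pvDrop_ne p qs h x hx hx1
    have htw : ((qs.takeWhile (fun q => q.1 == p.1)).map Prod.fst).count p.1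
        = (qs.takeWhile (fun q => q.1 == p.1)).length := by
      have h1 : ∀ b ∈ (qs.takeWhile (fun q => q.1 == p.1)).map Prod.fst, p.1 = b := by
        intro b hb
        rcases List.mem_map.mp hb with ⟨x, hx, rfl⟩
        exact (by simpa using List.mem_takeWhile_imp hx : x.1 = p.1).symm
      rw [List.count_eq_length.mpr h1, List.length_map]
    have hcount_p : ((p :: qs).map Prod.fst).count p.1
        = 1 + (qs.takeWhile (fun q => q.1 == p.1)).length := by
      rw [List.map_cons, List.count_cons, hqs, List.count_append, htw, hcount_d]
      simp [Nat.add_comm]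
    rw [pvRunCounts.eq_2, pvRunKeys.eq_2, List.map_cons, hcount_p, ih hpwd]
    refine congrArg₂ _ (by push_cast; ring) ?_
    apply List.map_congr_left
    intro u hu
    have humem : u ∈ (qs.dropWhile (fun q => q.1 == p.1)).map Prod.fst :=
      pvRunKeys_subset _ u hu
    have hune : u ≠ p.1 := by
      intro hq
      subst hq
      rw [List.count_eq_zero] at hcount_d
      exact hcount_d humem
    have : ((p :: qs).map Prod.fst).count u
        = ((qs.dropWhile (fun q => q.1 == p.1)).map Prod.fst).count u := by
      rw [List.map_cons, List.count_cons, hqs, List.count_append, hcount_t u hune]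
      simp [show (p.1 == u) = false by simpa using fun h => hune h.symm]
    rw [this]

-- ===== A-side characterisation (dict-of-sets) =====
lemma pvDA_get (ps : List (Int × Int)) : ∀ u : Int,
    (pvDA ps).get? u = if u ∈ ps.map Prod.fst
      then some (PySem.Set.ofList ((ps.filter (fun p => p.1 == u)).map Prod.snd))
      else none := by
  induction ps using List.reverseRecOn with
  | nil => intro u; simp [pvDA, PySem.Dict.get?_empty]
  | append_singleton ps p ih =>
    intro u
    have hfold : pvDA (ps ++ [p]) = pvStepA (pvDA ps) p := by
      simp [pvDA, List.foldl_append]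
    have hcont : (pvDA ps).contains p.1 = decide (p.1 ∈ ps.map Prod.fst) := by
      rw [PySem.Dict.contains_eq_isSome_get?, ih p.1]
      by_cases h : p.1 ∈ ps.map Prod.fst <;> simp [h]
    rw [hfold, pvStepA, hcont]
    by_cases hm : p.1 ∈ ps.map Prod.fst
    · rw [if_pos (by simp [hm])]
      by_cases hup : u = p.1
      · subst hup
        rw [PySem.Dict.get?_insert_self]
        have hD : (pvDA ps).getD p.1 PySem.Set.empty
            = PySem.Set.ofList ((ps.filter (fun q => q.1 == p.1)).map Prod.snd) :=
          PySem.Dict.getD_of_get?_eq_some _ _ (by rw [ih p.1, if_pos hm])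
        rw [hD]
        simp [List.filter_append, List.map_append, PySem.Set.ofList_append_singleton, hm]
      · rw [PySem.Dict.get?_insert_of_ne _ _ hup, ih u]
        have hne : ¬ (p.1 == u) := by simpa using Ne.symm hup
        simp only [List.filter_append, List.map_append]
        by_cases h2 : u ∈ List.map Prod.fst ps
        · rw [if_pos h2, if_pos (List.mem_append.mpr (Or.inl h2))]
          simp [hne]
        · rw [if_neg h2, if_neg ?_]
          intro h
          rcases List.mem_append.mp h with h | h
          · exact h2 h
          · exact hup (by simpa using h)
    · rw [if_neg (by simp [hm])]
      by_cases hup : u = p.1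
      · subst hup
        rw [PySem.Dict.get?_insert_self]
        have hnil : ps.filter (fun q => q.1 == p.1) = [] :=
          List.filter_eq_nil_iff.mpr (by
            intro q hq hbe
            exact hm (by
              have h1 : q.1 = p.1 := by simpa using hbe
              exact h1 ▸ List.mem_map_of_mem hq))
        simp [List.filter_append, List.map_append, hnil]
      · rw [PySem.Dict.get?_insert_of_ne _ _ hup, ih u]
        have hne : ¬ (p.1 == u) := by simpa using Ne.symm hup
        simp only [List.filter_append, List.map_append]
        by_cases h2 : u ∈ List.map Prod.fst ps
        · rw [if_pos h2, if_pos (List.mem_append.mpr (Or.inl h2))]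
          simp [hne]
        · rw [if_neg h2, if_neg ?_]
          intro h
          rcases List.mem_append.mp h with h | h
          · exact h2 h
          · exact hup (by simpa using h)

lemma pvStepA_insert : pvStepA = fun d p => d.insert p.1
    (if d.contains p.1 then PySem.Set.add (d.getD p.1 PySem.Set.empty) p.2
     else PySem.Set.ofList [p.2]) := by
  funext d p
  rw [pvStepA, apply_ite (d.insert p.1)]

lemma pvDA_keys (ps : List (Int × Int)) :
    (pvDA ps).keys = PySem.Set.ofList (ps.map Prod.fst) := by
  rw [pvDA, pvStepA_insert, PySem.Dict.keys_foldl_insert_key, PySem.Dict.keys_empty,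
    PySem.Set.update_nil_left]

lemma pvDA_keys_nodup (ps : List (Int × Int)) : (pvDA ps).keys.Nodup := by
  rw [pvDA, pvStepA_insert]
  exact PySem.Dict.nodup_keys_foldl_insert_key _ _ _ _ (by simp [PySem.Dict.keys_empty])

-- Set.ofList commutes with filter
lemma pvOfList_filter {α : Type} [BEq α] [LawfulBEq α] (xs : List α) (q : α → Bool) :
    (PySem.Set.ofList xs).filter q = PySem.Set.ofList (xs.filter q) := by
  induction xs using List.reverseRecOn with
  | nil => rfl
  | append_singleton xs x ih =>
    rw [PySem.Set.ofList_append_singleton, List.filter_append]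
    by_cases hx : x ∈ PySem.Set.ofList xs
    · have h1 : (PySem.Set.ofList xs).add x = PySem.Set.ofList xs := by
        simp [PySem.Set.add, hx]
      rw [h1, ih]
      by_cases hq : q x
      · have hxf : x ∈ xs.filter q :=
          List.mem_filter.mpr ⟨(PySem.Set.mem_ofList _ _).mp hx, hq⟩
        have h2 : x ∈ PySem.Set.ofList (xs.filter q) := (PySem.Set.mem_ofList _ _).mpr hxf
        simp [hq, PySem.Set.ofList_append_singleton, PySem.Set.add, h2]
      · simp [hq]
    · have h1 : (PySem.Set.ofList xs).add x = PySem.Set.ofList xs ++ [x] := by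
        simp [PySem.Set.add, hx]
      rw [h1, List.filter_append, ih]
      by_cases hq : q x
      · have hxf : x ∉ PySem.Set.ofList (xs.filter q) := by
          rw [PySem.Set.mem_ofList]
          intro h
          exact hx ((PySem.Set.mem_ofList _ _).mpr (List.mem_filter.mp h).1)
        simp [hq, PySem.Set.ofList_append_singleton, PySem.Set.add, hxf]
      · simp [hq]

-- Set.ofList commutes with an injective-on-xs map
lemma pvOfList_map_inj {α β : Type} [BEq α] [LawfulBEq α] [BEq β] [LawfulBEq β]
    (xs : List α) (f : α → β) (hinj : ∀ a ∈ xs, ∀ b ∈ xs, f a = f b → a = b) :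
    PySem.Set.ofList (xs.map f) = (PySem.Set.ofList xs).map f := by
  induction xs using List.reverseRecOn with
  | nil => rfl
  | append_singleton xs x ih =>
    have hinj' : ∀ a ∈ xs, ∀ b ∈ xs, f a = f b → a = b := fun a ha b hb =>
      hinj a (List.mem_append_left _ ha) b (List.mem_append_left _ hb)
    rw [List.map_append, List.map_cons, List.map_nil,
      PySem.Set.ofList_append_singleton, ih hinj', PySem.Set.ofList_append_singleton]
    by_cases hx : x ∈ PySem.Set.ofList xs
    · have h2 : f x ∈ (PySem.Set.ofList xs).map f := List.mem_map_of_mem hx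
      simp [PySem.Set.add, hx, h2]
    · have h2 : f x ∉ (PySem.Set.ofList xs).map f := by
        intro h
        rcases List.mem_map.mp h with ⟨y, hy, hfy⟩
        have : y = x := hinj y (List.mem_append_left _ ((PySem.Set.mem_ofList _ _).mp hy))
          x (List.mem_append_right _ (List.mem_singleton_self x)) hfy
        exact hx (this ▸ hy)
      simp [PySem.Set.add, hx, h2]

lemma pvDA_getD (ps : List (Int × Int)) (u : Int) (hu : u ∈ ps.map Prod.fst) :
    (pvDA ps).getD u PySem.Set.empty
      = PySem.Set.ofList ((ps.filter (fun p => p.1 == u)).map Prod.snd) :=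
  PySem.Dict.getD_of_get?_eq_some _ _ (by rw [pvDA_get ps u, if_pos hu])

-- the count of user u among the deduplicated pairs is the size of A's UAID set for u
lemma pvCount (ps : List (Int × Int)) (u : Int) :
    (((PySem.List.dedup ps).map Prod.fst).count u : Int)
      = PySem.Set.len (PySem.Set.ofList ((ps.filter (fun p => p.1 == u)).map Prod.snd)) := by
  have hinj : ∀ a ∈ ps.filter (fun p => p.1 == u), ∀ b ∈ ps.filter (fun p => p.1 == u),
      Prod.snd a = Prod.snd b → a = b := by
    intro a ha b hb h2
    have ha1 : a.1 = u := by simpa using (List.mem_filter.mp ha).2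
    have hb1 : b.1 = u := by simpa using (List.mem_filter.mp hb).2
    exact Prod.ext (ha1.trans hb1.symm) h2
  rw [pvOfList_map_inj _ _ hinj, ← pvOfList_filter, ← PySem.List.dedup_eq_ofList]
  show ((((PySem.List.dedup ps)).map Prod.fst).countP (· == u) : Int) = _
  rw [List.countP_map, List.countP_eq_length_filter]
  simp [PySem.Set.len]
  rfl

-- A's per-user set sizes, in dict order, as counts over the deduplicated pairs
lemma pvValuesA (ps : List (Int × Int)) :
    ((pvDA ps).values).map PySem.Set.len
      = (PySem.Set.ofList (ps.map Prod.fst)).map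
          (fun u => ((((PySem.List.dedup ps).map Prod.fst).count u : Nat) : Int)) := by
  rw [PySem.Dict.values_eq_map_keys _ (pvDA_keys_nodup ps) PySem.Set.empty, pvDA_keys,
    List.map_map]
  apply List.map_congr_left
  intro u hu
  have hu' : u ∈ ps.map Prod.fst := (PySem.Set.mem_ofList _ _).mp hu
  show PySem.Set.len ((pvDA ps).getD u PySem.Set.empty) = _
  rw [pvDA_getD ps u hu', ← pvCount]

-- ===== VERDICT (by name: the statement is the Claim_ definition above) =====
theorem solution_1236_5_spec : Claim_equal_solution_1236_5 := by
  intro logs k _ _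
  show solution_1236_5 logs k = solution_1236_5_alt logs k
  simp only [solution_1236_5, solution_1236_5_alt]
  have hA : (logs.foldl (fun d log =>
      let u := (PySem.List.pyGet? log 0).getD 0
      let v := (PySem.List.pyGet? log 1).getD 0
      if d.contains u then d.insert u (PySem.Set.add (d.getD u PySem.Set.empty) v)
      else d.insert u (PySem.Set.ofList [v])) PySem.Dict.empty)
      = pvDA (logs.map pvPairOf) := by
    rw [pvDA, List.foldl_map]
    rfl
  have hA2 : ∀ (vs : List (PySem.Set Int)) (a0 : List Int),
      vs.foldl (fun ans s => PySem.List.pySetD ans (PySem.Set.len s - 1)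
        (PySem.List.pyGetD ans (PySem.Set.len s - 1) 0 + 1)) a0
      = List.foldl pvStep a0 (vs.map PySem.Set.len) := by
    intro vs a0
    rw [List.foldl_map]
    rfl
  rw [hA, hA2, pvValuesA]
  have hgp : (PySem.List.sorted (PySem.List.dedup (logs.map pvPairOf)) (fun p => p.1) false).Pairwise
      (fun x y => x.1 ≤ y.1) :=
    PySem.List.sorted_pairwise (PySem.List.dedup (logs.map pvPairOf)) (fun p => p.1)
  show _ = pvFinish ((PySem.List.sorted (PySem.List.dedup (logs.map pvPairOf)) (fun p => p.1) false).foldl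
    pvF (List.replicate k.toNat 0, none, 0))
  rw [pvScan, pvRunCounts_grouped _ hgp]
  have hcnt : ∀ u : Int,
      ((PySem.List.sorted (PySem.List.dedup (logs.map pvPairOf)) (fun p => p.1) false).map Prod.fst).count u
      = ((PySem.List.dedup (logs.map pvPairOf)).map Prod.fst).count u := fun u =>
    ((PySem.List.sorted_perm (PySem.List.dedup (logs.map pvPairOf)) (fun p => p.1) false).map Prod.fst).count_eq u
  rw [List.map_congr_left (fun u _ => by rw [hcnt u] :
    ∀ u ∈ pvRunKeys (PySem.List.sorted (PySem.List.dedup (logs.map pvPairOf)) (fun p => p.1) false),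
      ((((PySem.List.sorted (PySem.List.dedup (logs.map pvPairOf)) (fun p => p.1) false).map Prod.fst).count u : Nat) : Int)
      = ((((PySem.List.dedup (logs.map pvPairOf)).map Prod.fst).count u : Nat) : Int))]
  have hkeys : (pvRunKeys (PySem.List.sorted (PySem.List.dedup (logs.map pvPairOf)) (fun p => p.1) false)).Perm
      (PySem.Set.ofList ((logs.map pvPairOf).map Prod.fst)) := by
    refine (List.perm_ext_iff_of_nodup (pvRunKeys_nodup _ hgp) (PySem.Set.nodup_ofList _)).mpr ?_
    intro u
    rw [pvRunKeys_mem _ hgp u, PySem.Set.mem_ofList,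
      ((PySem.List.sorted_perm (PySem.List.dedup (logs.map pvPairOf)) (fun p => p.1) false).map Prod.fst).mem_iff]
    simp [List.mem_map]
  exact (@List.Perm.foldl_eq _ _ pvStep _ _
    ⟨fun b c c' => by simpa [pvStep] using pvInc_comm b (c - 1) (c' - 1)⟩
    (hkeys.map _) (List.replicate k.toNat 0)).symm
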